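-- pv_equiv track=rewrite | github.com/JingGY/COMPSCI_130_Introduction_to_Software_Fundamentals | Assignments/assignment2.py | hash_string_weighted_folding
-- ===== SOURCE A (Python) =====
-- def hash_string_weighted_folding(string_to_hash, modulus):
--     a_list = []
--     for i in range(0, len(string_to_hash), 4):
--         if i+4 < len(string_to_hash):
--             new_string = string_to_hash[i:i+4]
--         else:
--             new_string = string_to_hash[i:]
--         a_list.append(new_string)
--     hash_sum = 0
--
--     for i in a_list:
--         count = 0
--         for j in i:
--             hash_sum += ord(j) * (256 ** count)
--             count += 1
--     hash_code = hash_sum % modulus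
--     return hash_code
-- ===== SOURCE B (Python) =====
-- def hash_string_weighted_folding(string_to_hash, modulus):
--     # One streaming pass: the weight of the char at global index i is 256**(i % 4),
--     # so the chunking into 4-char substrings is unnecessary.
--     hash_sum = 0
--     for i, ch in enumerate(string_to_hash):
--         hash_sum += ord(ch) * (256 ** (i % 4))
--     return hash_sum % modulus
-- ===== Notes on version B (the rewrite author's own statement) =====
-- stated objective: simpler
-- what changed: Dropped the materialized list of 4-char substrings and the nested chunk loop: B streams over the string once with enumerate, weighting each char by 256**(i % 4), which equals A's per-chunk weight 256**count.
import Mathlib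
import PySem

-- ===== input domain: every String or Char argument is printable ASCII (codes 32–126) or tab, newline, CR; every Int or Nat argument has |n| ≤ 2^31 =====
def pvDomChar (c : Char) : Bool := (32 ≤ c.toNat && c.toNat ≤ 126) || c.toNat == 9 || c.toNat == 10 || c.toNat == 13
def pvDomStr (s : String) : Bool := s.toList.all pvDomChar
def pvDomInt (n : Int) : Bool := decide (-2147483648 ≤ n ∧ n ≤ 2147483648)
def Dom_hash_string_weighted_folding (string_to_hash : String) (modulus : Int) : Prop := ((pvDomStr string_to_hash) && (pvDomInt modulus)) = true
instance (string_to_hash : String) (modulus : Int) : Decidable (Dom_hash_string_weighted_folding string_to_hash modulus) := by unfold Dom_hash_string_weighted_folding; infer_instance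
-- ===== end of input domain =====

-- B replaces A's materialize-chunks-then-nested-loop decomposition by a single enumerate pass
-- weighting each char by 256^(i % 4); objective: simpler.

-- ===== PORT A =====
def hash_string_weighted_folding (string_to_hash : String) (modulus : Int) : Int :=
  let s := string_to_hash.toList
  let n : Int := (s.length : Int)
  let a_list : List (List Char) :=
    (PySem.List.pyRange 0 n 4).foldl (fun a_list i =>
      let new_string :=
        if i + 4 < n then PySem.List.slice s (some i) (some (i + 4))
        else PySem.List.slice s (some i) none
      a_list ++ [new_string]) []
  let hash_sum : Int :=
    a_list.foldl (fun hash_sum i =>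
      (i.foldl (fun (p : Int × Nat) j =>
        (p.1 + (j.toNat : Int) * 256 ^ p.2, p.2 + 1)) (hash_sum, 0)).1) 0
  PySem.Int.mod hash_sum modulus

-- ===== PORT B =====
def hash_string_weighted_folding_alt (string_to_hash : String) (modulus : Int) : Int :=
  let hash_sum : Int :=
    (PySem.List.enumerate string_to_hash.toList 0).foldl
      (fun hash_sum p => hash_sum + (p.2.toNat : Int) * 256 ^ (PySem.Int.mod p.1 4).toNat) 0
  PySem.Int.mod hash_sum modulus

-- ===== PRECONDITION & SPEC =====
-- Python A raises ZeroDivisionError when modulus = 0; that is all Pre_ excludes.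
def Pre_hash_string_weighted_folding (string_to_hash : String) (modulus : Int) : Prop :=
  modulus ≠ 0
instance (string_to_hash : String) (modulus : Int) : Decidable (Pre_hash_string_weighted_folding string_to_hash modulus) := by unfold Pre_hash_string_weighted_folding; infer_instance

def pvWitness_hash_string_weighted_folding : String × Int := ("abcde", 97)

def Spec_hash_string_weighted_folding (string_to_hash : String) (modulus : Int) (out : Int) : Prop := out = hash_string_weighted_folding_alt string_to_hash modulus
instance (string_to_hash : String) (modulus : Int) (out : Int) : Decidable (Spec_hash_string_weighted_folding string_to_hash modulus out) := by unfold Spec_hash_string_weighted_folding; infer_instance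

-- ===== CLAIM (what is proved, stated in full; the proofs are below) =====
def Claim_equal_hash_string_weighted_folding : Prop := ∀ (string_to_hash : String) (modulus : Int), Dom_hash_string_weighted_folding string_to_hash modulus → Pre_hash_string_weighted_folding string_to_hash modulus → Spec_hash_string_weighted_folding string_to_hash modulus (hash_string_weighted_folding string_to_hash modulus)

-- ===== LEMMAS AND PROOFS =====

-- weighted value of one chunk, exponent starting at e (A's inner loop)
def pvWAux : List Char → Nat → Int
  | [], _ => 0
  | c :: cs, e => (c.toNat : Int) * 256 ^ e + pvWAux cs (e + 1)

-- B's running sum from global index k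
def pvBSum : List Char → Nat → Int
  | [], _ => 0
  | c :: cs, k => (c.toNat : Int) * 256 ^ (k % 4) + pvBSum cs (k + 1)

theorem pv_inner_fold (c : List Char) : ∀ (hs : Int) (k : Nat),
    (c.foldl (fun (p : Int × Nat) j =>
      (p.1 + (j.toNat : Int) * 256 ^ p.2, p.2 + 1)) (hs, k)).1 = hs + pvWAux c k := by
  induction c with
  | nil => intro hs k; simp [pvWAux]
  | cons a t ih => intro hs k; simp only [List.foldl_cons, pvWAux, ih]; ring

theorem pv_foldl_add {α : Type} (g : α → Int) : ∀ (cs : List α) (h0 : Int),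
    cs.foldl (fun h c => h + g c) h0 = h0 + (cs.map g).sum := by
  intro cs
  induction cs with
  | nil => intro h0; simp
  | cons c t ih => intro h0; simp only [List.foldl_cons, ih, List.map_cons, List.sum_cons]; ring

theorem pv_outer_fold (cs : List (List Char)) (h0 : Int) :
    cs.foldl (fun hash_sum i =>
      (i.foldl (fun (p : Int × Nat) j =>
        (p.1 + (j.toNat : Int) * 256 ^ p.2, p.2 + 1)) (hash_sum, 0)).1) h0
      = h0 + (cs.map (fun c => pvWAux c 0)).sum := by
  have h : (fun (hash_sum : Int) (i : List Char) =>
      (i.foldl (fun (p : Int × Nat) j =>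
        (p.1 + (j.toNat : Int) * 256 ^ p.2, p.2 + 1)) (hash_sum, 0)).1)
      = fun hash_sum i => hash_sum + pvWAux i 0 := by
    funext hs i; exact pv_inner_fold i hs 0
  rw [h, pv_foldl_add]

theorem pv_append_fold {α : Type} (f : α → List Char) (r : List α) : ∀ (acc : List (List Char)),
    r.foldl (fun a_list i => a_list ++ [f i]) acc = acc ++ r.map f := by
  induction r with
  | nil => intro acc; simp
  | cons x t ih => intro acc; simp [ih]

theorem pv_mod_cast (k : Nat) : (PySem.Int.mod (k : Int) 4).toNat = k % 4 := by
  rw [PySem.Int.mod_eq_emod_of_pos (by norm_num)]; omega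

theorem pv_bfold (l : List Char) : ∀ (k : Nat) (init : Int),
    (PySem.List.enumerate l (k : Int)).foldl
      (fun hash_sum p => hash_sum + (p.2.toNat : Int) * 256 ^ (PySem.Int.mod p.1 4).toNat) init
      = init + pvBSum l k := by
  induction l with
  | nil => intro k init; simp [PySem.List.enumerate_nil, pvBSum]
  | cons c t ih =>
    intro k init
    rw [PySem.List.enumerate_cons]
    have hc : ((k : Int) + 1) = ((k + 1 : Nat) : Int) := by push_cast; ring
    simp only [List.foldl_cons, hc, ih, pvBSum, pv_mod_cast]
    ring

theorem pv_bfold0 (l : List Char) (init : Int) :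
    (PySem.List.enumerate l 0).foldl
      (fun hash_sum p => hash_sum + (p.2.toNat : Int) * 256 ^ (PySem.Int.mod p.1 4).toNat) init
      = init + pvBSum l 0 := by
  have := pv_bfold l 0 init
  simpa using this

theorem pv_bsum_add_four (l : List Char) : ∀ (k : Nat), pvBSum l (k + 4) = pvBSum l k := by
  induction l with
  | nil => intro k; simp [pvBSum]
  | cons c t ih =>
    intro k
    have h1 : (k + 4) % 4 = k % 4 := Nat.add_mod_right k 4
    have h2 : k + 4 + 1 = (k + 1) + 4 := by omega
    simp only [pvBSum, h1, h2, ih]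

theorem pv_bsum_four (l : List Char) : pvBSum l 4 = pvBSum l 0 := pv_bsum_add_four l 0

theorem pv_take4 (l : List Char) : pvBSum l 0 = pvWAux (l.take 4) 0 + pvBSum (l.drop 4) 0 := by
  rcases l with _ | ⟨a, _ | ⟨b, _ | ⟨c, _ | ⟨d, rest⟩⟩⟩⟩ <;>
    simp [pvBSum, pvWAux, pv_bsum_four] <;> ring

theorem pv_main : ∀ (m : Nat) (l : List Char), l.length ≤ 4 * m →
    ((List.range m).map (fun k => pvWAux ((l.drop (4 * k)).take 4) 0)).sum = pvBSum l 0 := by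
  intro m
  induction m with
  | zero =>
    intro l hl
    have hnil : l = [] := List.eq_nil_of_length_eq_zero (by omega)
    subst hnil; simp [pvBSum]
  | succ m ih =>
    intro l hl
    rw [List.range_succ_eq_map]
    simp only [List.map_cons, List.map_map, List.sum_cons, Nat.mul_zero, List.drop_zero]
    have hcomp : ((fun k => pvWAux ((l.drop (4 * k)).take 4) 0) ∘ Nat.succ)
        = fun k => pvWAux (((l.drop 4).drop (4 * k)).take 4) 0 := by
      funext k
      simp only [Function.comp_apply]
      have h4 : (l.drop 4).drop (4 * k) = l.drop (4 * Nat.succ k) := by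
        rw [List.drop_drop]; congr 1; omega
      rw [h4]
    rw [hcomp, ih (l.drop 4) (by rw [List.length_drop]; omega), pv_take4 l]

theorem pv_chunk_eq (s : List Char) (k : Nat) :
    (if (0 : Int) + 4 * (k : Int) + 4 < (s.length : Int)
       then PySem.List.slice s (some ((0 : Int) + 4 * (k : Int))) (some ((0 : Int) + 4 * (k : Int) + 4))
       else PySem.List.slice s (some ((0 : Int) + 4 * (k : Int))) none)
      = (s.drop (4 * k)).take 4 := by
  have h0 : (0 : Int) + 4 * (k : Int) = ((4 * k : Nat) : Int) := by push_cast; ring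
  split_ifs with h
  · rw [h0]
    rw [PySem.List.slice_toNat s (by positivity) (by positivity)]
    congr 1
    omega
  · rw [h0, PySem.List.slice_from s (by positivity)]
    rw [Int.toNat_natCast]
    refine (List.take_of_length_le ?_).symm
    simp only [List.length_drop]
    omega

theorem pv_hash_sum_eq (s : List Char) :
    (((PySem.List.pyRange 0 (s.length : Int) 4).foldl (fun a_list i =>
        a_list ++ [if i + 4 < (s.length : Int)
                    then PySem.List.slice s (some i) (some (i + 4))
                    else PySem.List.slice s (some i) none]) []).foldl
      (fun hash_sum i =>
        (i.foldl (fun (p : Int × Nat) j =>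
          (p.1 + (j.toNat : Int) * 256 ^ p.2, p.2 + 1)) (hash_sum, 0)).1) 0)
    = (PySem.List.enumerate s 0).foldl
        (fun hash_sum p => hash_sum + (p.2.toNat : Int) * 256 ^ (PySem.Int.mod p.1 4).toNat) 0 := by
  rw [pv_append_fold, pv_outer_fold, pv_bfold0]
  simp only [zero_add, List.nil_append]
  rw [PySem.List.pyRange_of_pos 0 (s.length : Int) (by norm_num), List.map_map, List.map_map]
  have hcomp : (((fun c => pvWAux c 0) ∘ (fun i => if i + 4 < (s.length : Int)
                    then PySem.List.slice s (some i) (some (i + 4))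
                    else PySem.List.slice s (some i) none)) ∘ (fun k : Nat => (0 : Int) + 4 * (k : Int)))
      = fun k : Nat => pvWAux ((s.drop (4 * k)).take 4) 0 := by
    funext k
    simp only [Function.comp]
    rw [pv_chunk_eq]
  rw [hcomp]
  apply pv_main
  split_ifs with h
  · omega
  · omega

-- ===== VERDICT (by name: the statement is the Claim_ definition above) =====
theorem hash_string_weighted_folding_spec : Claim_equal_hash_string_weighted_folding := by
  intro s m _ _
  unfold Spec_hash_string_weighted_folding
  simp only [hash_string_weighted_folding, hash_string_weighted_folding_alt]
  rw [pv_hash_sum_eq]
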